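-- pv_equiv track=rewrite | github.com/blas1306/MathTeX_Studio | src/qt_app.py | _line_opens_block
-- ===== SOURCE A (Python) =====
-- def _line_opens_block(line: str) -> bool:
--     stripped = line.strip()
--     if not stripped:
--         return False
--     if stripped.endswith(":"):
--         return True
--     lowered = stripped.lower()
--     starters = ("for", "if", "elif", "else", "while", "function", "repeat", "until")
--     return any(lowered.startswith(f"{w} ") or lowered == w for w in starters)
-- ===== SOURCE B (Python) =====
-- _KEYWORDS = ("for", "if", "elif", "else", "while", "function", "repeat", "until")
--
-- def _line_opens_block(line: str) -> bool:
--     stripped = line.strip()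
--     if not stripped:
--         return False
--     if stripped.endswith(":"):
--         return True
--     # single left-to-right pass over the characters: narrow the candidate
--     # keywords position by position (a parallel trie walk); accept iff some
--     # candidate is fully consumed exactly at the first-token boundary
--     candidates = list(_KEYWORDS)
--     i = 0
--     for ch in stripped:
--         if ch == ' ':
--             break
--         c = ch.lower()
--         candidates = [w for w in candidates if i < len(w) and w[i] == c]
--         i += 1
--     return any(len(w) == i for w in candidates)
-- ===== Notes on version B (the rewrite author's own statement) =====
-- stated objective: alternative
-- what changed: B transposes the loops: instead of testing each of the eight starter keywords against the line with startswith/equality, it makes one left-to-right pass over the line's characters, narrowing a candidate-keyword list position by position (a parallel trie walk with early break at the first space) and accepting iff some surviving candidate is fully consumed at the token boundary.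
import Mathlib
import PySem

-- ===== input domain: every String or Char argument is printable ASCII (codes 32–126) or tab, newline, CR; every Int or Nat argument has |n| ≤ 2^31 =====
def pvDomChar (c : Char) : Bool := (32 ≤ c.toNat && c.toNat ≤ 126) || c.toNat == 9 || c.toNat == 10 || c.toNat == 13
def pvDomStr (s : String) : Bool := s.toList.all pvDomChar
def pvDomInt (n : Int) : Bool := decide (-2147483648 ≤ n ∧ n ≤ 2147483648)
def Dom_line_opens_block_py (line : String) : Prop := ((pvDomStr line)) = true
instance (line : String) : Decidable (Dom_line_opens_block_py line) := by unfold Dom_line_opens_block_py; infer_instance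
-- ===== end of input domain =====

-- B transposes the loops: one pass over the line's characters narrowing a candidate-keyword
-- list position by position, instead of A's per-keyword startswith scan (alternative; same cost).

-- ===== PORT A =====
-- the tuple `starters` of A
def pvStartersA : List (List Char) :=
  ["for".toList, "if".toList, "elif".toList, "else".toList, "while".toList,
   "function".toList, "repeat".toList, "until".toList]

def line_opens_block_py (line : String) : Bool :=
  let stripped := PySem.Chars.strip line.toList
  if stripped.isEmpty then false
  else if PySem.Chars.endswith stripped [':'] then true
  else
    let lowered := PySem.Chars.lower stripped
    pvStartersA.any (fun w => PySem.Chars.startswith lowered (w ++ [' ']) || lowered == w)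

-- ===== PORT B =====
-- the module-level tuple _KEYWORDS of B
def pvKeywords : List (List Char) :=
  ["for".toList, "if".toList, "elif".toList, "else".toList, "while".toList,
   "function".toList, "repeat".toList, "until".toList]

-- B's `for ch in stripped: if ch == ' ': break; …` loop with its (candidates, i) state;
-- `w[i]` is guarded by `i < len(w)` in the Python, so `getD i ' '` (the default is never read) is exact
def pvWalk : List (List Char) → Nat → List Char → List (List Char) × Nat
  | cs, i, [] => (cs, i)
  | cs, i, ch :: t =>
    if ch == ' ' then (cs, i)
    else
      let c := PySem.Chars.lowerChar ch
      pvWalk (cs.filter (fun w => decide (i < w.length) && (w.getD i ' ' == c))) (i + 1) t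

def line_opens_block_py_alt (line : String) : Bool :=
  let stripped := PySem.Chars.strip line.toList
  if stripped.isEmpty then false
  else if PySem.Chars.endswith stripped [':'] then true
  else
    let r := pvWalk pvKeywords 0 stripped
    r.1.any (fun w => w.length == r.2)

-- ===== PRECONDITION & SPEC =====
def Spec_line_opens_block_py (line : String) (out : Bool) : Prop := out = line_opens_block_py_alt line
instance (line : String) (out : Bool) : Decidable (Spec_line_opens_block_py line out) := by unfold Spec_line_opens_block_py; infer_instance

-- ===== CLAIM (what is proved, stated in full; the proofs are below) =====
def Claim_equal_line_opens_block_py : Prop := ∀ (line : String), Dom_line_opens_block_py line → Spec_line_opens_block_py line (line_opens_block_py line)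

-- ===== LEMMAS AND PROOFS =====

-- for a space-free keyword w: `lowered.startswith(w + " ") or lowered == w` is exactly "first token = w"
lemma tok_eq (w l : List Char) (hw : (' ' : Char) ∉ w) :
    (PySem.Chars.startswith l (w ++ [' ']) || l == w) =
      decide (l.takeWhile (fun c => c != ' ') = w) := by
  have htw : w.takeWhile (fun c => c != ' ') = w :=
    List.takeWhile_eq_self_iff.mpr (by intro a ha; simp only [bne_iff_ne, ne_eq]; rintro rfl; exact hw ha)
  rcases Bool.eq_false_or_eq_true (PySem.Chars.startswith l (w ++ [' ']) || l == w) with hb | hb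
  swap
  · rw [hb]
    rcases Bool.or_eq_false_iff.mp hb with ⟨h1, h2⟩
    symm; simp only [decide_eq_false_iff_not]
    intro heq
    have hsplit := List.takeWhile_append_dropWhile (p := fun c => c != ' ') (l := l)
    rcases hd : l.dropWhile (fun c => c != ' ') with _ | ⟨d, rest⟩
    · have : l = w := by rw [← hsplit, hd, heq, List.append_nil]
      simp [this] at h2
    · have hdsp : d = ' ' := by
        have := List.head_dropWhile_not (p := fun c => c != ' ') (l := l) (by simp [hd])
        simpa [hd] using this
      have hl : l = w ++ ' ' :: rest := by rw [← hsplit, hd, heq, hdsp]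
      have : PySem.Chars.startswith l (w ++ [' ']) = true := by
        rw [PySem.Chars.startswith_iff, hl]
        exact ⟨rest, by simp⟩
      simp [this] at h1
  · rw [hb]
    rcases Bool.or_eq_true_iff.mp hb with h1 | h2
    · rcases (PySem.Chars.startswith_iff _ _).mp h1 with ⟨t, ht⟩
      subst ht
      symm; simp only [decide_eq_true_iff]
      rw [List.append_assoc, List.takeWhile_append_of_pos ?_, List.singleton_append,
          List.takeWhile_cons_of_neg (by simp)]
      · simp
      · intro a ha; simp only [bne_iff_ne, ne_eq]; rintro rfl; exact hw ha
    · have : l = w := by simpa using h2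
      subst this
      symm; simp [htw]

-- lowering a character never creates or destroys a space
lemma lowerChar_space (c : Char) : (PySem.Chars.lowerChar c != ' ') = (c != ' ') := by
  unfold PySem.Chars.lowerChar
  split_ifs with h
  · have h' : 65 ≤ c.toNat ∧ c.toNat ≤ 90 := by
      unfold PySem.Chars.isupper at h
      simp only [Bool.and_eq_true, decide_eq_true_iff, Char.le_def] at h
      exact h
    have h1 : Char.ofNat (c.toNat + 32) ≠ ' ' := by
      intro he
      have hv : (c.toNat + 32).isValidChar := Or.inl (by omega)
      have hn : (Char.ofNat (c.toNat + 32)).toNat = c.toNat + 32 := by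
        unfold Char.ofNat
        rw [dif_pos hv]
        unfold Char.ofNatAux Char.toNat
        simp
        omega
      rw [he] at hn
      have : (' ' : Char).toNat = 32 := rfl
      omega
    have h2 : c ≠ ' ' := by
      intro he; subst he; revert h'; decide
    rw [Bool.eq_iff_iff]
    simp [bne_iff_ne, h1, h2]
  · rfl

-- the per-keyword test commutes with lowercasing the first token
lemma tok_comm (s : List Char) :
    (PySem.Chars.lower s).takeWhile (fun c => c != ' ') =
      (s.takeWhile (fun c => c != ' ')).map PySem.Chars.lowerChar := by
  unfold PySem.Chars.lower
  rw [List.takeWhile_map]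
  congr 1
  have hfun : ((fun c : Char => c != ' ') ∘ PySem.Chars.lowerChar) = (fun c : Char => c != ' ') := by
    funext a
    exact lowerChar_space a
  rw [hfun]

-- one filtering step equals extending the matched prefix by one character
lemma step_pred (w : List Char) (i : Nat) (c : Char) (m : List Char) :
    ((decide (i < w.length) && (w.getD i ' ' == c)) && m.isPrefixOf (w.drop (i + 1))) =
      (c :: m).isPrefixOf (w.drop i) := by
  by_cases h : i < w.length
  · rw [List.drop_eq_getElem_cons h, List.getD_eq_getElem _ _ h]
    simp only [List.isPrefixOf, h, decide_true, Bool.true_and]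
    rw [Bool.beq_comm]
  · rw [List.drop_eq_nil_of_le (by omega), List.drop_eq_nil_of_le (by omega)]
    simp [List.isPrefixOf, h]

-- the walk's invariant: the survivors are the keywords that continue the lowered token read so far
lemma pvWalk_spec (l : List Char) : ∀ (cs : List (List Char)) (i : Nat),
    pvWalk cs i l =
      (cs.filter (fun w =>
          ((l.takeWhile (fun c => c != ' ')).map PySem.Chars.lowerChar).isPrefixOf (w.drop i)),
        i + (l.takeWhile (fun c => c != ' ')).length) := by
  induction l with
  | nil =>
    intro cs i
    simp [pvWalk]
  | cons ch t ih =>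
    intro cs i
    by_cases hch : ch = ' '
    · subst hch
      simp [pvWalk, List.takeWhile_cons_of_neg]
    · have hb : (ch == ' ') = false := by simp [hch]
      rw [List.takeWhile_cons_of_pos (by simp [hch])]
      simp only [pvWalk, hb, Bool.false_eq_true, if_false]
      rw [ih]
      rw [List.filter_filter, Prod.mk.injEq]
      refine ⟨?_, by simp [List.length_cons]; omega⟩
      apply List.filter_congr
      intro w _
      rw [List.map_cons, Bool.and_comm]
      exact step_pred w i (PySem.Chars.lowerChar ch) _

-- a prefix of equal length is the list itself
lemma pref_len (T w : List Char) :
    (T.isPrefixOf w && (w.length == T.length)) = decide (T = w) := by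
  rw [Bool.eq_iff_iff]
  simp only [Bool.and_eq_true, List.isPrefixOf_iff_prefix, beq_iff_eq, decide_eq_true_iff]
  constructor
  · rintro ⟨hp, hl⟩; exact hp.eq_of_length hl.symm
  · rintro rfl; exact ⟨List.prefix_refl _, rfl⟩

-- any over a filtered list
lemma any_filter {α : Type} (l : List α) (p q : α → Bool) :
    (l.filter p).any q = l.any (fun a => p a && q a) := by
  induction l with
  | nil => rfl
  | cons a t ih =>
    by_cases h : p a = true
    · simp [h, ih]
    · simp only [Bool.not_eq_true] at h
      simp [h, ih]

-- ===== VERDICT (by name: the statement is the Claim_ definition above) =====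
theorem line_opens_block_py_spec : Claim_equal_line_opens_block_py := by
  intro line _
  unfold Spec_line_opens_block_py line_opens_block_py line_opens_block_py_alt
  simp only []
  set stripped := PySem.Chars.strip line.toList with hs
  by_cases h1 : stripped.isEmpty
  · simp [h1]
  · by_cases h2 : PySem.Chars.endswith stripped [':']
    · simp [h1, h2]
    · simp only [h1, h2, if_false, Bool.false_eq_true]
      rw [pvWalk_spec]
      simp only [List.drop_zero, Nat.zero_add]
      set T := (stripped.takeWhile (fun c => c != ' ')).map PySem.Chars.lowerChar with hT
      rw [any_filter]
      have hlen : (stripped.takeWhile (fun c => c != ' ')).length = T.length := by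
        rw [hT, List.length_map]
      rw [hlen]
      have hBw : ∀ w : List Char,
          (T.isPrefixOf w && (w.length == T.length)) = decide (T = w) := pref_len T
      have hall : ∀ w ∈ pvStartersA,
          (PySem.Chars.startswith (PySem.Chars.lower stripped) (w ++ [' ']) ||
            PySem.Chars.lower stripped == w) = decide (T = w) := by
        intro w hw
        rw [tok_eq _ _ (by fin_cases hw <;> decide), tok_comm, ← hT]
      have hkw : pvKeywords = pvStartersA := rfl
      rw [hkw]
      simp only [pvStartersA, List.any_cons, List.any_nil] at hall ⊢
      rw [hall _ (by simp), hall _ (by simp), hall _ (by simp), hall _ (by simp),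
          hall _ (by simp), hall _ (by simp), hall _ (by simp), hall _ (by simp),
          hBw, hBw, hBw, hBw, hBw, hBw, hBw, hBw]
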